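-- pv_equiv track=rewrite | github.com/fangyuchu/vllm-ascend | vllm_ascend/eplb/core/policy/policy_fault_rearrangement.py | swap_experts_between_ranks
-- ===== SOURCE A (Python) =====
-- def swap_experts_between_ranks(
--
--     max_rank_deployment_set,
--     swap_rank_deployment_set,
--     max_rank_rev_expert,
--     swap_rank_rev_expert,
--     workload,
--     max_rank_load,
--     swap_rank_load,
-- ):
--     max_rank_expert = -1
--     swap_rank_expert = -1
--     max_weight = max_rank_load
--
--     for cur_expert_id in max_rank_deployment_set:
--         if cur_expert_id in swap_rank_deployment_set or cur_expert_id in max_rank_rev_expert: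
--             continue
--
--         cur_weight = workload[cur_expert_id]
--
--         for next_expert_id in swap_rank_deployment_set:
--             if next_expert_id in max_rank_deployment_set or next_expert_id in swap_rank_rev_expert:
--                 continue
--
--             next_weight = workload[next_expert_id]
--
--             cur_load_after_swap = max_rank_load - cur_weight + next_weight
--             next_load_after_swap = swap_rank_load - next_weight + cur_weight
--             max_load_after_swap = max(cur_load_after_swap, next_load_after_swap)
--             if max_load_after_swap < max_weight:
--                 max_weight = max_load_after_swap
--                 max_rank_expert = cur_expert_id
--                 swap_rank_expert = next_expert_id
--
--     return max_rank_expert, swap_rank_expert, max_weight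
-- ===== SOURCE B (Python) =====
-- def swap_experts_between_ranks(
--     max_rank_deployment_set,
--     swap_rank_deployment_set,
--     max_rank_rev_expert,
--     swap_rank_rev_expert,
--     workload,
--     max_rank_load,
--     swap_rank_load,
-- ):
--     swap_set = set(swap_rank_deployment_set)
--     max_rev = set(max_rank_rev_expert)
--     curs = [e for e in max_rank_deployment_set
--             if e not in swap_set and e not in max_rev]
--     if not curs:
--         return -1, -1, max_rank_load
--
--     max_set = set(max_rank_deployment_set)
--     swap_rev = set(swap_rank_rev_expert)
--     nxts = [e for e in swap_rank_deployment_set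
--             if e not in max_set and e not in swap_rev]
--
--     # first (position, expert) for each distinct candidate weight
--     by_w = {}
--     for pos, e in enumerate(nxts):
--         w = workload[e]
--         if w not in by_w:
--             by_w[w] = (pos, e)
--     ws = sorted(by_w)
--     n = len(ws)
--
--     best = (max_rank_load, -1, -1)  # (max load after swap, cur expert, next expert)
--     for cur in curs:
--         cw = workload[cur]
--         t2 = swap_rank_load - max_rank_load + 2 * cw
--         # binary search: p = number of candidate weights w with 2*w <= t2
--         lo, hi = 0, n
--         while lo < hi:
--             mid = (lo + hi) // 2
--             if 2 * ws[mid] <= t2: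
--                 lo = mid + 1
--             else:
--                 hi = mid
--         p = lo
--         cand = None  # (post-swap max load, first position, expert)
--         if p > 0:
--             w = ws[p - 1]
--             pos, e = by_w[w]
--             cand = (swap_rank_load + cw - w, pos, e)
--         if p < n:
--             w = ws[p]
--             pos, e = by_w[w]
--             c2 = (max_rank_load - cw + w, pos, e)
--             if cand is None or (c2[0], c2[1]) < (cand[0], cand[1]):
--                 cand = c2
--         if cand is not None and cand[0] < best[0]:
--             best = (cand[0], cur, cand[2])
--     return best[1], best[2], best[0]
-- ===== Notes on version B (the rewrite author's own statement) =====
-- stated objective: alternative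
-- what changed: A scans every (cur, next) expert pair with nested loops and linear list membership tests; B precomputes the valid candidate sets, builds a first-occurrence dict of distinct next-candidate weights, sorts those weights once, and for each cur binary-searches the weight nearest the balance point (swap_load-max_load+2*cur_weight)/2, keeping A's exact strict-improvement and first-occurrence tie-breaking.
import Mathlib
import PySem

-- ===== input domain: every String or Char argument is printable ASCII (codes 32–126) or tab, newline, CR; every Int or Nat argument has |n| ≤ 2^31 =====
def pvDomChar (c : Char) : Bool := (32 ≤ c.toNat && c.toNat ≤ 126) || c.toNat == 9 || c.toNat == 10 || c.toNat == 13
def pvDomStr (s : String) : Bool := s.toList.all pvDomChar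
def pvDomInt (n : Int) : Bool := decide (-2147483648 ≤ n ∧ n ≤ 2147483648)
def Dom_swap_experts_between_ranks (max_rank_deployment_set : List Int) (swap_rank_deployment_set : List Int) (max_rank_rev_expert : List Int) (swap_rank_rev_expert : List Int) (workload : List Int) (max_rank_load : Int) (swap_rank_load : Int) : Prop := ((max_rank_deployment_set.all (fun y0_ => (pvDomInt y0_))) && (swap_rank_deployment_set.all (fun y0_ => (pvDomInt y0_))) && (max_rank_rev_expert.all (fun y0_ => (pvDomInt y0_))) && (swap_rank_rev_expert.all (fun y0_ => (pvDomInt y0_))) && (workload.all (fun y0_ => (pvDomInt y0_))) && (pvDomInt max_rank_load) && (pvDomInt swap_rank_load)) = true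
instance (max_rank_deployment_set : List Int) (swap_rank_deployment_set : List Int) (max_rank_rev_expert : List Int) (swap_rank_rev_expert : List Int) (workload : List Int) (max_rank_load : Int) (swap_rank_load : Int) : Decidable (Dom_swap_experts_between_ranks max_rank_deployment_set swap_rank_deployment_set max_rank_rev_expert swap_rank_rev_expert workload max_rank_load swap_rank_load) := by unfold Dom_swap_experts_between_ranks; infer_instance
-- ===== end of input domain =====

-- B replaces A's nested scan over (cur, next) pairs by a per-cur binary search over the
-- sorted distinct candidate weights (first-occurrence tie-break kept); equivalence proved on Pre_.

-- ===== PORT A =====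
def swap_experts_between_ranks (max_rank_deployment_set : List Int) (swap_rank_deployment_set : List Int) (max_rank_rev_expert : List Int) (swap_rank_rev_expert : List Int) (workload : List Int) (max_rank_load : Int) (swap_rank_load : Int) : Int × Int × Int :=
  max_rank_deployment_set.foldl (fun st cur_expert_id =>
    if cur_expert_id ∈ swap_rank_deployment_set ∨ cur_expert_id ∈ max_rank_rev_expert then st
    else
      let cur_weight := PySem.List.pyGetD workload cur_expert_id 0
      swap_rank_deployment_set.foldl (fun st2 next_expert_id =>
        if next_expert_id ∈ max_rank_deployment_set ∨ next_expert_id ∈ swap_rank_rev_expert then st2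
        else
          let next_weight := PySem.List.pyGetD workload next_expert_id 0
          let cur_load_after_swap := max_rank_load - cur_weight + next_weight
          let next_load_after_swap := swap_rank_load - next_weight + cur_weight
          let max_load_after_swap := max cur_load_after_swap next_load_after_swap
          if max_load_after_swap < st2.2.2 then (cur_expert_id, next_expert_id, max_load_after_swap)
          else st2) st)
    (-1, -1, max_rank_load)

-- ===== PORT B =====
-- hand-written binary search from Source B: p = number of ws[j] with 2*ws[j] ≤ t2 (ws sorted)
def pvBsearch (ws : List Int) (t2 : Int) (lo hi : Nat) : Nat :=
  if h : lo < hi then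
    let mid := (lo + hi) / 2
    if 2 * PySem.List.pyGetD ws (mid : Int) 0 ≤ t2 then pvBsearch ws t2 (mid + 1) hi
    else pvBsearch ws t2 lo mid
  else lo
termination_by hi - lo
decreasing_by all_goals omega

def swap_experts_between_ranks_alt (max_rank_deployment_set : List Int) (swap_rank_deployment_set : List Int) (max_rank_rev_expert : List Int) (swap_rank_rev_expert : List Int) (workload : List Int) (max_rank_load : Int) (swap_rank_load : Int) : Int × Int × Int :=
  let swap_set : PySem.Set Int := PySem.Set.ofList swap_rank_deployment_set
  let max_rev : PySem.Set Int := PySem.Set.ofList max_rank_rev_expert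
  let curs := max_rank_deployment_set.filter (fun e => !PySem.Set.contains swap_set e && !PySem.Set.contains max_rev e)
  if curs = [] then (-1, -1, max_rank_load)
  else
    let max_set : PySem.Set Int := PySem.Set.ofList max_rank_deployment_set
    let swap_rev : PySem.Set Int := PySem.Set.ofList swap_rank_rev_expert
    let nxts := swap_rank_deployment_set.filter (fun e => !PySem.Set.contains max_set e && !PySem.Set.contains swap_rev e)
    let by_w : PySem.Dict Int (Int × Int) := (PySem.List.enumerate nxts 0).foldl (fun d pe =>
        let w := PySem.List.pyGetD workload pe.2 0
        if d.contains w then d else d.insert w (pe.1, pe.2)) PySem.Dict.empty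
    let ws := PySem.List.sorted (PySem.Dict.keys by_w) (fun x => x) false
    let n := ws.length
    let best := curs.foldl (fun best cur =>
      let cw := PySem.List.pyGetD workload cur 0
      let t2 := swap_rank_load - max_rank_load + 2 * cw
      let p := pvBsearch ws t2 0 n
      let cand : Option (Int × Int × Int) := none
      let cand := if 0 < p then
          let w := PySem.List.pyGetD ws ((p : Int) - 1) 0
          let pe := by_w.getD w (0, 0)
          some (swap_rank_load + cw - w, pe.1, pe.2)
        else cand
      let cand := if p < n then
          let w := PySem.List.pyGetD ws (p : Int) 0
          let pe := by_w.getD w (0, 0)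
          let c2 : Int × Int × Int := (max_rank_load - cw + w, pe.1, pe.2)
          match cand with
          | none => some c2
          | some c => if c2.1 < c.1 ∨ (c2.1 = c.1 ∧ c2.2.1 < c.2.1) then some c2 else some c
        else cand
      match cand with
      | none => best
      | some c => if c.1 < best.1 then (c.1, cur, c.2.2) else best)
      (max_rank_load, -1, -1)
    (best.2.1, best.2.2, best.1)

-- ===== PRECONDITION & SPEC =====
-- Pre_ excludes exactly the inputs on which Python A raises IndexError: a workload index
-- out of range for some non-skipped cur expert, or (when some non-skipped cur exists)
-- for some non-skipped next expert.
def Pre_swap_experts_between_ranks (max_rank_deployment_set : List Int) (swap_rank_deployment_set : List Int) (max_rank_rev_expert : List Int) (swap_rank_rev_expert : List Int) (workload : List Int) (max_rank_load : Int) (swap_rank_load : Int) : Prop :=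
  (∀ e ∈ max_rank_deployment_set, ¬(e ∈ swap_rank_deployment_set ∨ e ∈ max_rank_rev_expert) → PySem.Raise.InRange workload.length e) ∧
  ((∃ e ∈ max_rank_deployment_set, ¬(e ∈ swap_rank_deployment_set ∨ e ∈ max_rank_rev_expert)) →
    ∀ e ∈ swap_rank_deployment_set, ¬(e ∈ max_rank_deployment_set ∨ e ∈ swap_rank_rev_expert) → PySem.Raise.InRange workload.length e)
instance (max_rank_deployment_set : List Int) (swap_rank_deployment_set : List Int) (max_rank_rev_expert : List Int) (swap_rank_rev_expert : List Int) (workload : List Int) (max_rank_load : Int) (swap_rank_load : Int) : Decidable (Pre_swap_experts_between_ranks max_rank_deployment_set swap_rank_deployment_set max_rank_rev_expert swap_rank_rev_expert workload max_rank_load swap_rank_load) := by unfold Pre_swap_experts_between_ranks; infer_instance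

def pvWitness_swap_experts_between_ranks : List Int × List Int × List Int × List Int × List Int × Int × Int :=
  ([0], [1], [], [], [5, 3], 10, 2)

def Spec_swap_experts_between_ranks (max_rank_deployment_set : List Int) (swap_rank_deployment_set : List Int) (max_rank_rev_expert : List Int) (swap_rank_rev_expert : List Int) (workload : List Int) (max_rank_load : Int) (swap_rank_load : Int) (out : Int × Int × Int) : Prop := out = swap_experts_between_ranks_alt max_rank_deployment_set swap_rank_deployment_set max_rank_rev_expert swap_rank_rev_expert workload max_rank_load swap_rank_load
instance (max_rank_deployment_set : List Int) (swap_rank_deployment_set : List Int) (max_rank_rev_expert : List Int) (swap_rank_rev_expert : List Int) (workload : List Int) (max_rank_load : Int) (swap_rank_load : Int) (out : Int × Int × Int) : Decidable (Spec_swap_experts_between_ranks max_rank_deployment_set swap_rank_deployment_set max_rank_rev_expert swap_rank_rev_expert workload max_rank_load swap_rank_load out) := by unfold Spec_swap_experts_between_ranks; infer_instance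

-- ===== CLAIM (what is proved, stated in full; the proofs are below) =====
def Claim_equal_swap_experts_between_ranks : Prop := ∀ (max_rank_deployment_set : List Int) (swap_rank_deployment_set : List Int) (max_rank_rev_expert : List Int) (swap_rank_rev_expert : List Int) (workload : List Int) (max_rank_load : Int) (swap_rank_load : Int), Dom_swap_experts_between_ranks max_rank_deployment_set swap_rank_deployment_set max_rank_rev_expert swap_rank_rev_expert workload max_rank_load swap_rank_load → Pre_swap_experts_between_ranks max_rank_deployment_set swap_rank_deployment_set max_rank_rev_expert swap_rank_rev_expert workload max_rank_load swap_rank_load → Spec_swap_experts_between_ranks max_rank_deployment_set swap_rank_deployment_set max_rank_rev_expert swap_rank_rev_expert workload max_rank_load swap_rank_load (swap_experts_between_ranks max_rank_deployment_set swap_rank_deployment_set max_rank_rev_expert swap_rank_rev_expert workload max_rank_load swap_rank_load)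

-- ===== LEMMAS AND PROOFS =====

-- canonical forms of the two candidate filters
def pvCurs (mds sds mre : List Int) : List Int :=
  mds.filter (fun e => !(decide (e ∈ sds) || decide (e ∈ mre)))
def pvNxts (mds sds sre : List Int) : List Int :=
  sds.filter (fun e => !(decide (e ∈ mds) || decide (e ∈ sre)))
def pvWt (workload : List Int) (e : Int) : Int := PySem.List.pyGetD workload e 0
-- post-swap max load for a cur of weight cw against a next of weight w (A's expression)
def pvG (ml sl cw w : Int) : Int := max (ml - cw + w) (sl - w + cw)

-- first minimum (value, element) of v over a list, ties to the earliest element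
def pvFirstMin (v : Int → Int) : List Int → Option (Int × Int)
  | [] => none
  | e :: rest =>
    match pvFirstMin v rest with
    | none => some (v e, e)
    | some (m, e') => if v e ≤ m then some (v e, e) else some (m, e')

lemma pvFirstMin_some (v : Int → Int) (cs : List Int) (m e : Int)
    (h : pvFirstMin v cs = some (m, e)) : e ∈ cs ∧ v e = m := by
  induction cs generalizing m e with
  | nil => simp [pvFirstMin] at h
  | cons x rest ih =>
    simp only [pvFirstMin] at h
    cases hrest : pvFirstMin v rest with
    | none => rw [hrest] at h; simp at h; exact ⟨by simp [← h.2], by rw [← h.2, h.1]⟩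
    | some p =>
      cases p with | mk m' e' =>
      rw [hrest] at h
      by_cases hle : v x ≤ m'
      · simp [hle] at h; exact ⟨by simp [← h.2], by rw [← h.2, h.1]⟩
      · simp [hle] at h
        obtain ⟨h1, h2⟩ := h
        obtain ⟨hmem, hval⟩ := ih m' e' hrest
        subst h1; subst h2; exact ⟨by simp [hmem], hval⟩

lemma pvFirstMin_mem (v : Int → Int) (cs : List Int) (m e : Int)
    (h : pvFirstMin v cs = some (m, e)) : e ∈ cs := (pvFirstMin_some v cs m e h).1

lemma pvFirstMin_val (v : Int → Int) (cs : List Int) (m e : Int)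
    (h : pvFirstMin v cs = some (m, e)) : v e = m := (pvFirstMin_some v cs m e h).2

lemma pvFirstMin_spec_of (v : Int → Int) (cs : List Int) (i : Nat) (m : Int)
    (hi : i < cs.length) (hm : v cs[i] = m)
    (hbefore : ∀ j (hj : j < cs.length), j < i → m < v cs[j])
    (hall : ∀ x ∈ cs, m ≤ v x) :
    pvFirstMin v cs = some (m, cs[i]) := by
  induction cs generalizing i with
  | nil => simp at hi
  | cons e rest ih =>
    simp only [pvFirstMin]
    cases i with
    | zero =>
      simp only [List.getElem_cons_zero] at hm ⊢
      cases hrest : pvFirstMin v rest with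
      | none => simp [hm]
      | some p =>
        cases p with | mk m' e' =>
        have hmem : e' ∈ rest := by
          have : rest ≠ [] := by
            intro h; rw [h] at hrest; simp [pvFirstMin] at hrest
          -- m' , e' come from rest; we only need v e ≤ m'
          -- m ≤ all values in rest, and m' is a value of rest
          exact pvFirstMin_mem v rest m' e' hrest
        have : m ≤ m' := by
          have hve : v e' = m' := pvFirstMin_val v rest m' e' hrest
          have := hall e' (by simp [hmem])
          omega
        simp [hm, this]
    | succ i' =>
      simp only [List.length_cons, Nat.succ_lt_succ_iff] at hi
      simp only [List.getElem_cons_succ] at hm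
      have hrest := ih i' hi hm
        (fun j hj hji => hbefore (j+1) (by simpa using Nat.succ_lt_succ hj) (Nat.succ_lt_succ hji))
        (fun x hx => hall x (by simp [hx]))
      rw [hrest]
      have hgt : m < v e := hbefore 0 (by simp) (Nat.succ_pos i')
      simp only [List.getElem_cons_succ]
      have : ¬ v e ≤ m := by omega
      simp [this]


-- A's strict-improvement inner loop computes the first minimum
lemma pvInnerA_char (v : Int → Int) (cur : Int) (cs : List Int) (st : Int × Int × Int) :
    cs.foldl (fun st2 n => if v n < st2.2.2 then (cur, n, v n) else st2) st =
      (match pvFirstMin v cs with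
      | none => st
      | some (m, e) => if m < st.2.2 then (cur, e, m) else st) := by
  induction cs generalizing st with
  | nil => simp [pvFirstMin]
  | cons x rest ih =>
    simp only [List.foldl_cons, pvFirstMin]
    rw [ih]
    cases hrest : pvFirstMin v rest with
    | none =>
      by_cases h : v x < st.2.2 <;> simp [h]
    | some p =>
      cases p with | mk m e =>
      by_cases h1 : v x < st.2.2
      · by_cases h2 : v x ≤ m
        · have h3 : ¬ m < (cur, x, v x).2.2 ∨ m = v x := by
            by_cases hm : m < v x
            · right; omega
            · left; simpa using hm
          by_cases hm : m < v x
          · simp only [if_pos h1, if_pos h2]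
            have : m = v x := by omega
            subst this
            simp
          · simp only [if_pos h1, if_pos h2]
            have : ¬ m < (cur, x, v x).2.2 := by simpa using hm
            simp [this, h1]
        · simp only [if_pos h1, if_neg h2]
          have hmlt : m < (cur, x, v x).2.2 := by simp; omega
          have : m < st.2.2 := by
            simp at hmlt; omega
          simp [hmlt, this]
      · by_cases h2 : v x ≤ m
        · have : ¬ m < st.2.2 := by omega
          have hvx : ¬ v x < st.2.2 := h1
          simp [h1, h2, this]
        · simp [h1, h2]

-- A unfolded to folds over the canonical candidate lists
lemma pvA_eq (mds sds mre sre workload : List Int) (ml sl : Int) :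
    swap_experts_between_ranks mds sds mre sre workload ml sl =
      (pvCurs mds sds mre).foldl (fun st cur =>
        (pvNxts mds sds sre).foldl (fun st2 n =>
          if pvG ml sl (pvWt workload cur) (pvWt workload n) < st2.2.2
          then (cur, n, pvG ml sl (pvWt workload cur) (pvWt workload n)) else st2) st)
        (-1, -1, ml) := by
  unfold swap_experts_between_ranks pvCurs pvNxts pvG pvWt
  rw [List.foldl_filter]
  congr 1
  funext st cur
  by_cases h : cur ∈ sds ∨ cur ∈ mre
  · rw [if_pos h, if_neg (by rcases h with h | h <;> simp [h])]
  · have h1 : cur ∉ sds := fun hc => h (Or.inl hc)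
    have h2 : cur ∉ mre := fun hc => h (Or.inr hc)
    rw [if_neg h, if_pos (by simp [h1, h2])]
    dsimp only
    rw [List.foldl_filter]
    congr 1
    funext st2 n
    by_cases hn : n ∈ mds ∨ n ∈ sre
    · rw [if_pos hn, if_neg (by rcases hn with hn | hn <;> simp [hn])]
    · have hn1 : n ∉ mds := fun hc => hn (Or.inl hc)
      have hn2 : n ∉ sre := fun hc => hn (Or.inr hc)
      rw [if_neg hn]
      symm
      rw [if_pos (by simp [hn1, hn2])]

-- ---- B-side canonical definitions (mirroring the let-chain of the alt port) ----
def pvStep (workload : List Int) (d : PySem.Dict Int (Int × Int)) (pe : Int × Int) : PySem.Dict Int (Int × Int) :=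
  if d.contains (PySem.List.pyGetD workload pe.2 0) then d
  else d.insert (PySem.List.pyGetD workload pe.2 0) (pe.1, pe.2)

def pvByW (workload : List Int) (nxts : List Int) : PySem.Dict Int (Int × Int) :=
  (PySem.List.enumerate nxts 0).foldl (pvStep workload) PySem.Dict.empty

def pvWs (workload : List Int) (nxts : List Int) : List Int :=
  PySem.List.sorted ((pvByW workload nxts).keys) (fun x => x) false

lemma pvContains_ofList (l : List Int) (x : Int) :
    PySem.Set.contains (PySem.Set.ofList l) x = decide (x ∈ l) := by
  simp [PySem.Set.contains]

lemma pvFilter_curs (mds sds mre : List Int) :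
    mds.filter (fun e => !PySem.Set.contains (PySem.Set.ofList sds) e
      && !PySem.Set.contains (PySem.Set.ofList mre) e) = pvCurs mds sds mre := by
  unfold pvCurs
  apply List.filter_congr
  intro x _
  rw [pvContains_ofList, pvContains_ofList]
  by_cases h1 : x ∈ sds <;> by_cases h2 : x ∈ mre <;> simp [h1, h2]

lemma pvFilter_nxts (mds sds sre : List Int) :
    sds.filter (fun e => !PySem.Set.contains (PySem.Set.ofList mds) e
      && !PySem.Set.contains (PySem.Set.ofList sre) e) = pvNxts mds sds sre := by
  unfold pvNxts
  apply List.filter_congr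
  intro x _
  rw [pvContains_ofList, pvContains_ofList]
  by_cases h1 : x ∈ mds <;> by_cases h2 : x ∈ sre <;> simp [h1, h2]

-- the insert-if-absent fold keeps the FIRST entry for every weight
lemma pvStep_fold_get? (workload : List Int) (l : List (Int × Int))
    (d : PySem.Dict Int (Int × Int)) (w : Int) :
    (l.foldl (pvStep workload) d).get? w =
      (d.get? w).or (l.find? (fun pe => decide (PySem.List.pyGetD workload pe.2 0 = w))) := by
  induction l generalizing d with
  | nil => simp
  | cons pe l ih =>
    rw [List.foldl_cons, ih, List.find?_cons]
    by_cases hw : PySem.List.pyGetD workload pe.2 0 = w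
    · simp only [hw, decide_true]
      by_cases hc : d.contains w
      · have hsome : (d.get? w).isSome := by
          rw [PySem.Dict.contains_eq_isSome_get?] at hc; exact hc
        cases hg : d.get? w with
        | none => rw [hg] at hsome; simp at hsome
        | some v => simp [pvStep, hw, hc, hg]
      · have hnone : d.get? w = none := by
          rw [PySem.Dict.get?_eq_none_iff_contains]; simpa using hc
        simp only [pvStep, hw, hc, if_neg, Bool.false_eq_true, not_false_iff, ite_false]
        rw [PySem.Dict.get?_insert, if_pos rfl, hnone]
        simp
    · simp only [hw, decide_false]
      by_cases hc : d.contains (PySem.List.pyGetD workload pe.2 0)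
      · simp [pvStep, hc]
      · simp only [pvStep, hc, Bool.false_eq_true, not_false_iff, ite_false]
        rw [PySem.Dict.get?_insert, if_neg (fun h => hw h.symm)]

lemma pvStep_fold_nodup_keys (workload : List Int) (l : List (Int × Int))
    (d : PySem.Dict Int (Int × Int)) (h : d.keys.Nodup) :
    (l.foldl (pvStep workload) d).keys.Nodup := by
  induction l generalizing d with
  | nil => simpa
  | cons pe l ih =>
    rw [List.foldl_cons]
    apply ih
    unfold pvStep
    split
    · exact h
    · exact PySem.Dict.nodup_keys_insert _ _ _ h

lemma pvByW_get? (workload nxts : List Int) (w : Int) :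
    (pvByW workload nxts).get? w =
      (PySem.List.enumerate nxts 0).find?
        (fun pe => decide (PySem.List.pyGetD workload pe.2 0 = w)) := by
  unfold pvByW
  rw [pvStep_fold_get?]
  simp

lemma pvByW_nodup_keys (workload nxts : List Int) : (pvByW workload nxts).keys.Nodup :=
  pvStep_fold_nodup_keys workload _ _ PySem.Dict.nodup_keys_empty

-- what a dict entry means: first occurrence of the weight w among the candidates
lemma pvByW_char (workload nxts : List Int) (w k e : Int)
    (h : (pvByW workload nxts).get? w = some (k, e)) :
    ∃ (i : Nat) (hi : i < nxts.length), k = (i : Int) ∧ e = nxts[i] ∧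
      PySem.List.pyGetD workload e 0 = w ∧
      ∀ (j : Nat) (hj : j < nxts.length), j < i → PySem.List.pyGetD workload (nxts[j]) 0 ≠ w := by
  rw [pvByW_get?] at h
  rw [List.find?_eq_some_iff_getElem] at h
  obtain ⟨hp, i, hi, hget, hbefore⟩ := h
  have hlen : i < nxts.length := by simpa [PySem.List.length_enumerate] using hi
  simp only [PySem.List.getElem_enumerate, Prod.ext_iff] at hget
  obtain ⟨hk, he⟩ := hget
  refine ⟨i, hlen, by rw [← hk]; simp, he.symm, by simpa using hp, ?_⟩
  intro j hj hji
  have hb := hbefore j hji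
  simp only [PySem.List.getElem_enumerate] at hb
  simpa using hb

lemma pvWs_pairwise (workload nxts : List Int) :
    (pvWs workload nxts).Pairwise (· < ·) := by
  unfold pvWs
  have hperm := PySem.List.sorted_perm ((pvByW workload nxts).keys) (fun x => x) false
  have hnodup : (PySem.List.sorted ((pvByW workload nxts).keys) (fun x => x) false).Nodup :=
    hperm.nodup_iff.mpr (pvByW_nodup_keys workload nxts)
  have hle := PySem.List.sorted_pairwise ((pvByW workload nxts).keys) (fun x => x)
  exact (hle.and hnodup).imp (fun h => lt_of_le_of_ne h.1 h.2)

lemma pvWs_mem (workload nxts : List Int) (w : Int) :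
    w ∈ pvWs workload nxts ↔ ∃ e ∈ nxts, PySem.List.pyGetD workload e 0 = w := by
  unfold pvWs
  rw [PySem.List.mem_sorted]
  constructor
  · intro h
    have : (pvByW workload nxts).get? w ≠ none :=
      fun hn => (PySem.Dict.get?_eq_none_iff_not_mem_keys _ _).mp hn (by simpa using h)
    cases hg : (pvByW workload nxts).get? w with
    | none => exact absurd hg this
    | some pe =>
      rw [pvByW_get?] at hg
      have := List.find?_some hg
      have hmem := List.mem_of_find?_eq_some hg
      rw [PySem.List.mem_enumerate_iff] at hmem
      obtain ⟨kk, hkk, rfl⟩ := hmem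
      exact ⟨nxts[kk], by simp, by simpa using this⟩
  · intro ⟨e, he, hw⟩
    by_contra hnot
    have : (pvByW workload nxts).get? w = none := by
      rw [PySem.Dict.get?_eq_none_iff_not_mem_keys]; exact hnot
    rw [pvByW_get?] at this
    rw [List.find?_eq_none] at this
    obtain ⟨kk, hkk, hek⟩ := List.mem_iff_getElem.mp he
    have := this (0 + kk, nxts[kk]) (by
      rw [PySem.List.mem_enumerate_iff]; exact ⟨kk, hkk, rfl⟩)
    simp [hek, hw] at this


-- binary search returns the split point of the predicate 2*w ≤ t2 on a sorted list
lemma pvBsearch_spec (ws : List Int) (t2 : Int)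
    (hmono : ∀ i j : Nat, i ≤ j → j < ws.length → ws.getD i 0 ≤ ws.getD j 0)
    (lo hi : Nat) (h1 : lo ≤ hi) (h2 : hi ≤ ws.length)
    (h3 : ∀ j : Nat, j < lo → 2 * ws.getD j 0 ≤ t2)
    (h4 : ∀ j : Nat, hi ≤ j → j < ws.length → ¬ (2 * ws.getD j 0 ≤ t2)) :
    lo ≤ pvBsearch ws t2 lo hi ∧ pvBsearch ws t2 lo hi ≤ hi ∧
    (∀ j : Nat, j < pvBsearch ws t2 lo hi → 2 * ws.getD j 0 ≤ t2) ∧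
    (∀ j : Nat, pvBsearch ws t2 lo hi ≤ j → j < ws.length → ¬ (2 * ws.getD j 0 ≤ t2)) := by
  rw [pvBsearch]
  by_cases h : lo < hi
  · rw [dif_pos h]
    dsimp only
    rw [PySem.List.pyGetD_natCast]
    by_cases hc : 2 * ws.getD ((lo + hi) / 2) 0 ≤ t2
    · rw [if_pos hc]
      obtain ⟨a, b, c, d⟩ := pvBsearch_spec ws t2 hmono ((lo + hi) / 2 + 1) hi (by omega) h2
        (fun j hj => by
          have : ws.getD j 0 ≤ ws.getD ((lo + hi) / 2) 0 := hmono j _ (by omega) (by omega)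
          omega)
        h4
      exact ⟨by omega, b, c, d⟩
    · rw [if_neg hc]
      obtain ⟨a, b, c, d⟩ := pvBsearch_spec ws t2 hmono lo ((lo + hi) / 2) (by omega) (by omega) h3
        (fun j hj hjl => by
          have : ws.getD ((lo + hi) / 2) 0 ≤ ws.getD j 0 := hmono _ j (by omega) hjl
          omega)
      exact ⟨a, by omega, c, d⟩
  · rw [dif_neg h]
    exact ⟨le_refl _, by omega, h3, fun j hj hjl => h4 j (by omega) hjl⟩
termination_by hi - lo
decreasing_by all_goals omega


-- B's per-cur candidate (the binary-search branch of the alt port, verbatim)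
def pvCand (workload : List Int) (ml sl : Int) (nxts : List Int) (cw : Int) : Option (Int × Int × Int) :=
  let ws := pvWs workload nxts
  let n := ws.length
  let t2 := sl - ml + 2 * cw
  let p := pvBsearch ws t2 0 n
  let cand : Option (Int × Int × Int) := none
  let cand := if 0 < p then
      let w := PySem.List.pyGetD ws ((p : Int) - 1) 0
      let pe := (pvByW workload nxts).getD w (0, 0)
      some (sl + cw - w, pe.1, pe.2)
    else cand
  let cand := if p < n then
      let w := PySem.List.pyGetD ws (p : Int) 0
      let pe := (pvByW workload nxts).getD w (0, 0)
      let c2 : Int × Int × Int := (ml - cw + w, pe.1, pe.2)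
      match cand with
      | none => some c2
      | some c => if c2.1 < c.1 ∨ (c2.1 = c.1 ∧ c2.2.1 < c.2.1) then some c2 else some c
    else cand
  cand

-- B unfolded to the canonical candidate lists
lemma pvB_eq (mds sds mre sre workload : List Int) (ml sl : Int) :
    swap_experts_between_ranks_alt mds sds mre sre workload ml sl =
      if pvCurs mds sds mre = [] then (-1, -1, ml)
      else
        (fun best => (best.2.1, best.2.2, best.1))
          ((pvCurs mds sds mre).foldl (fun best cur =>
            match pvCand workload ml sl (pvNxts mds sds sre) (PySem.List.pyGetD workload cur 0) with
            | none => best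
            | some c => if c.1 < best.1 then (c.1, cur, c.2.2) else best) (ml, -1, -1)) := by
  unfold swap_experts_between_ranks_alt pvCand pvWs pvByW pvStep
  dsimp only
  rw [pvFilter_curs, pvFilter_nxts]

-- each sorted distinct weight has a well-formed first-occurrence dict entry
lemma pvWs_entry (workload nxts : List Int) (idx : Nat) (h : idx < (pvWs workload nxts).length) :
    ∃ (i : Nat) (hi : i < nxts.length),
      (pvByW workload nxts).getD ((pvWs workload nxts).getD idx 0) (0, 0) = ((i : Int), nxts[i]) ∧
      PySem.List.pyGetD workload (nxts[i]) 0 = (pvWs workload nxts).getD idx 0 ∧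
      ∀ (j : Nat) (hj : j < nxts.length), j < i →
        PySem.List.pyGetD workload (nxts[j]) 0 ≠ (pvWs workload nxts).getD idx 0 := by
  rw [List.getD_eq_getElem _ _ h]
  have hmem : (pvWs workload nxts)[idx] ∈ pvWs workload nxts := List.getElem_mem _
  obtain ⟨e, he, hwe⟩ := (pvWs_mem workload nxts _).mp hmem
  obtain ⟨kk, hkk, hek⟩ := List.mem_iff_getElem.mp he
  have hsome : ((pvByW workload nxts).get? ((pvWs workload nxts)[idx])).isSome := by
    rw [pvByW_get?, List.find?_isSome]
    refine ⟨((0 : Int) + (kk : Int), nxts[kk]), ?_, by simp [hek, hwe]⟩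
    rw [PySem.List.mem_enumerate_iff]
    exact ⟨kk, hkk, rfl⟩
  cases hg : (pvByW workload nxts).get? ((pvWs workload nxts)[idx]) with
  | none => rw [hg] at hsome; simp at hsome
  | some pe =>
    obtain ⟨k, e'⟩ := pe
    obtain ⟨i, hi, hk, he', hw, hfirst⟩ := pvByW_char workload nxts _ k e' hg
    refine ⟨i, hi, ?_, by rw [← he']; exact hw, hfirst⟩
    rw [PySem.Dict.getD_of_get?_eq_some _ _ hg, hk, he']

-- THE core lemma: B's binary-search candidate equals the first minimum of the
-- post-swap load over the candidate next list (A's inner loop semantics)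
lemma pvCand_char (workload : List Int) (ml sl : Int) (nxts : List Int) (cw : Int) :
    (pvCand workload ml sl nxts cw).map (fun c => (c.1, c.2.2)) =
      pvFirstMin (fun e => pvG ml sl cw (PySem.List.pyGetD workload e 0)) nxts := by
  unfold pvCand
  dsimp only
  set v := fun e => pvG ml sl cw (PySem.List.pyGetD workload e 0) with hv
  set ws := pvWs workload nxts with hws
  set t2 := sl - ml + 2 * cw with ht2
  set n := ws.length with hn
  set p := pvBsearch ws t2 0 n with hp
  have hpw := pvWs_pairwise workload nxts
  rw [← hws] at hpw
  have hlt : ∀ i j : Nat, i < j → j < n → ws.getD i 0 < ws.getD j 0 := by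
    intro i j hij hj
    rw [List.getD_eq_getElem _ _ (by omega), List.getD_eq_getElem _ _ (by omega)]
    exact List.pairwise_iff_getElem.mp hpw i j (by omega) (by omega) hij
  have hmono : ∀ i j : Nat, i ≤ j → j < ws.length → ws.getD i 0 ≤ ws.getD j 0 := by
    intro i j hij hj
    rcases Nat.lt_or_ge i j with hc | hc
    · exact le_of_lt (hlt i j hc (by omega))
    · have : i = j := by omega
      subst this; exact le_refl _
  obtain ⟨-, hpn, hPle, hPgt⟩ := pvBsearch_spec ws t2 hmono 0 n (by omega) (by rw [hn])
    (by intro j hj; exact absurd hj (by omega))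
    (by intro j hj hjl; rw [hn] at hj; omega)
  rw [← hp] at hpn hPle hPgt
  have hgl : ∀ w : Int, 2 * w ≤ t2 → pvG ml sl cw w = sl - w + cw := by
    intro w h; unfold pvG; rw [max_eq_right (by omega)]
  have hgr : ∀ w : Int, ¬(2 * w ≤ t2) → pvG ml sl cw w = ml - cw + w := by
    intro w h; unfold pvG; rw [max_eq_left (by omega)]
  have hwt_mem : ∀ x ∈ nxts, ∃ idx : Nat, idx < n ∧
      ws.getD idx 0 = PySem.List.pyGetD workload x 0 := by
    intro x hx
    have hm : PySem.List.pyGetD workload x 0 ∈ ws := by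
      rw [hws]; exact (pvWs_mem workload nxts _).mpr ⟨x, hx, rfl⟩
    obtain ⟨idx, hidx, he⟩ := List.mem_iff_getElem.mp hm
    refine ⟨idx, by omega, ?_⟩
    rw [List.getD_eq_getElem _ _ hidx]
    exact he
  have hvall : ∀ mlow : Int,
      (∀ idx : Nat, idx < n → mlow ≤ pvG ml sl cw (ws.getD idx 0)) →
      ∀ x ∈ nxts, mlow ≤ v x := by
    intro mlow hbnd x hx
    obtain ⟨idx, hidx, he⟩ := hwt_mem x hx
    have := hbnd idx hidx
    rw [he] at this
    exact this
  by_cases h1 : p < n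
  · rw [if_pos h1]
    have hcastR : PySem.List.pyGetD ws (p : Int) 0 = ws.getD p 0 :=
      PySem.List.pyGetD_natCast ws p 0
    obtain ⟨iR, hiR, hdR, hwR, hfR⟩ := pvWs_entry workload nxts p (by rw [← hws]; omega)
    rw [← hws] at hdR hwR hfR
    have hPwR : ¬ (2 * ws.getD p 0 ≤ t2) := hPgt p (le_refl p) (by omega)
    by_cases h0 : 0 < p
    · rw [if_pos h0]
      have hcastL : PySem.List.pyGetD ws ((p : Int) - 1) 0 = ws.getD (p - 1) 0 := by
        have hc : ((p : Int) - 1) = ((p - 1 : Nat) : Int) := by omega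
        rw [hc, PySem.List.pyGetD_natCast]
      obtain ⟨iL, hiL, hdL, hwL, hfL⟩ := pvWs_entry workload nxts (p - 1) (by rw [← hws]; omega)
      rw [← hws] at hdL hwL hfL
      have hPwL : 2 * ws.getD (p - 1) 0 ≤ t2 := hPle (p - 1) (by omega)
      rw [hcastL, hcastR, hdL, hdR]
      dsimp only
      by_cases hlex : ml - cw + ws.getD p 0 < sl + cw - ws.getD (p - 1) 0 ∨
          (ml - cw + ws.getD p 0 = sl + cw - ws.getD (p - 1) 0 ∧ (iR : Int) < (iL : Int))
      · rw [if_pos hlex]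
        dsimp only [Option.map_some]
        symm
        apply pvFirstMin_spec_of v nxts iR (ml - cw + ws.getD p 0) hiR
        · simp only [hv]
          rw [hwR, hgr _ hPwR]
        · intro j hj hji
          have hne : PySem.List.pyGetD workload (nxts[j]) 0 ≠ ws.getD p 0 := hfR j hj hji
          obtain ⟨idx, hidx, he⟩ := hwt_mem (nxts[j]) (List.getElem_mem hj)
          have hvj : v (nxts[j]) = pvG ml sl cw (ws.getD idx 0) := by
            simp only [hv]; rw [he]
          rcases Nat.lt_or_ge idx p with hip | hip
          · have hP : 2 * ws.getD idx 0 ≤ t2 := hPle idx hip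
            rw [hvj, hgl _ hP]
            rcases Nat.lt_or_ge idx (p - 1) with hip1 | hip1
            · have := hlt idx (p - 1) (by omega) (by omega)
              rcases hlex with hlex | hlex
              · omega
              · omega
            · have hidx1 : idx = p - 1 := by omega
              rw [hidx1] at he
              have hwj : PySem.List.pyGetD workload (nxts[j]) 0 = ws.getD (p - 1) 0 := he.symm
              have hjge : ¬ j < iL := fun hc => hfL j hj hc hwj
              rcases hlex with hlex | hlex
              · rw [hidx1]; omega
              · exfalso
                have : iR < iL := by exact_mod_cast hlex.2
                omega
          · have hne' : idx ≠ p := by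
              intro hc; rw [hc] at he; exact hne he.symm
            have hP : ¬ (2 * ws.getD idx 0 ≤ t2) := hPgt idx (by omega) (by omega)
            rw [hvj, hgr _ hP]
            have := hlt p idx (by omega) (by omega)
            omega
        · apply hvall
          intro idx hidx
          rcases Nat.lt_or_ge idx p with hip | hip
          · rw [hgl _ (hPle idx hip)]
            have hle2 : ws.getD idx 0 ≤ ws.getD (p - 1) 0 := hmono idx (p - 1) (by omega) (by omega)
            rcases hlex with hlex | hlex
            · omega
            · omega
          · rw [hgr _ (hPgt idx (by omega) (by omega))]
            have hle2 : ws.getD p 0 ≤ ws.getD idx 0 := hmono p idx (by omega) (by omega)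
            omega
      · rw [if_neg hlex]
        dsimp only [Option.map_some]
        symm
        apply pvFirstMin_spec_of v nxts iL (sl + cw - ws.getD (p - 1) 0) hiL
        · simp only [hv]
          rw [hwL, hgl _ hPwL]
          ring
        · intro j hj hji
          have hne : PySem.List.pyGetD workload (nxts[j]) 0 ≠ ws.getD (p - 1) 0 := hfL j hj hji
          obtain ⟨idx, hidx, he⟩ := hwt_mem (nxts[j]) (List.getElem_mem hj)
          have hvj : v (nxts[j]) = pvG ml sl cw (ws.getD idx 0) := by
            simp only [hv]; rw [he]
          push_neg at hlex
          rcases Nat.lt_or_ge idx p with hip | hip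
          · have hne' : idx ≠ p - 1 := by
              intro hc; rw [hc] at he; exact hne he.symm
            rw [hvj, hgl _ (hPle idx hip)]
            have := hlt idx (p - 1) (by omega) (by omega)
            omega
          · rcases Nat.lt_or_ge p idx with hc | hc
            · rw [hvj, hgr _ (hPgt idx (by omega) (by omega))]
              have := hlt p idx hc (by omega)
              have hge := hlex.1
              omega
            · have hidxp : idx = p := by omega
              rw [hidxp] at he hvj
              rw [hvj, hgr _ hPwR]
              have hge := hlex.1
              rcases lt_or_eq_of_le hge with hgt | heq2
              · omega
              · exfalso
                have hIL : (iL : Int) ≤ (iR : Int) := hlex.2 heq2.symm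
                have hwj : PySem.List.pyGetD workload (nxts[j]) 0 = ws.getD p 0 := he.symm
                have : ¬ j < iR := fun hcc => hfR j hj hcc hwj
                omega
        · apply hvall
          intro idx hidx
          push_neg at hlex
          rcases Nat.lt_or_ge idx p with hip | hip
          · rw [hgl _ (hPle idx hip)]
            have hle2 : ws.getD idx 0 ≤ ws.getD (p - 1) 0 := hmono idx (p - 1) (by omega) (by omega)
            omega
          · rw [hgr _ (hPgt idx (by omega) (by omega))]
            have hle2 : ws.getD p 0 ≤ ws.getD idx 0 := hmono p idx (by omega) (by omega)
            have hge := hlex.1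
            omega
    · -- p = 0: right candidate only
      rw [if_neg h0]
      rw [hcastR, hdR]
      dsimp only [Option.map_some]
      symm
      apply pvFirstMin_spec_of v nxts iR (ml - cw + ws.getD p 0) hiR
      · simp only [hv]
        rw [hwR, hgr _ hPwR]
      · intro j hj hji
        have hne : PySem.List.pyGetD workload (nxts[j]) 0 ≠ ws.getD p 0 := hfR j hj hji
        obtain ⟨idx, hidx, he⟩ := hwt_mem (nxts[j]) (List.getElem_mem hj)
        have hvj : v (nxts[j]) = pvG ml sl cw (ws.getD idx 0) := by
          simp only [hv]; rw [he]
        have hne' : idx ≠ p := by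
          intro hc; rw [hc] at he; exact hne he.symm
        have hP : ¬ (2 * ws.getD idx 0 ≤ t2) := hPgt idx (by omega) (by omega)
        rw [hvj, hgr _ hP]
        have := hlt p idx (by omega) (by omega)
        omega
      · apply hvall
        intro idx hidx
        rw [hgr _ (hPgt idx (by omega) (by omega))]
        have hle2 : ws.getD p 0 ≤ ws.getD idx 0 := hmono p idx (by omega) (by omega)
        omega
  · rw [if_neg h1]
    by_cases h0 : 0 < p
    · -- p = n > 0: left candidate only
      rw [if_pos h0]
      have hcastL : PySem.List.pyGetD ws ((p : Int) - 1) 0 = ws.getD (p - 1) 0 := by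
        have hc : ((p : Int) - 1) = ((p - 1 : Nat) : Int) := by omega
        rw [hc, PySem.List.pyGetD_natCast]
      obtain ⟨iL, hiL, hdL, hwL, hfL⟩ := pvWs_entry workload nxts (p - 1) (by rw [← hws]; omega)
      rw [← hws] at hdL hwL hfL
      have hPwL : 2 * ws.getD (p - 1) 0 ≤ t2 := hPle (p - 1) (by omega)
      rw [hcastL, hdL]
      dsimp only [Option.map_some]
      symm
      apply pvFirstMin_spec_of v nxts iL (sl + cw - ws.getD (p - 1) 0) hiL
      · simp only [hv]
        rw [hwL, hgl _ hPwL]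
        ring
      · intro j hj hji
        have hne : PySem.List.pyGetD workload (nxts[j]) 0 ≠ ws.getD (p - 1) 0 := hfL j hj hji
        obtain ⟨idx, hidx, he⟩ := hwt_mem (nxts[j]) (List.getElem_mem hj)
        have hvj : v (nxts[j]) = pvG ml sl cw (ws.getD idx 0) := by
          simp only [hv]; rw [he]
        have hne' : idx ≠ p - 1 := by
          intro hc; rw [hc] at he; exact hne he.symm
        rw [hvj, hgl _ (hPle idx (by omega))]
        have := hlt idx (p - 1) (by omega) (by omega)
        omega
      · apply hvall
        intro idx hidx
        rw [hgl _ (hPle idx (by omega))]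
        have hle2 : ws.getD idx 0 ≤ ws.getD (p - 1) 0 := hmono idx (p - 1) (by omega) (by omega)
        omega
    · -- p = n = 0: no candidates at all
      rw [if_neg h0]
      cases hnx : nxts with
      | nil => simp [pvFirstMin]
      | cons e r =>
        exfalso
        obtain ⟨idx, hidx, -⟩ := hwt_mem e (by rw [hnx]; exact List.mem_cons_self)
        omega


-- outer loops agree (A's state is (cur, next, load), B's is (load, cur, next))
lemma pvOuter (workload : List Int) (ml sl : Int) (nxts : List Int) (curs : List Int) :
    ∀ a b m : Int,
      curs.foldl (fun st cur =>
        nxts.foldl (fun st2 n =>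
          if pvG ml sl (PySem.List.pyGetD workload cur 0) (PySem.List.pyGetD workload n 0) < st2.2.2
          then (cur, n, pvG ml sl (PySem.List.pyGetD workload cur 0) (PySem.List.pyGetD workload n 0))
          else st2) st) (a, b, m)
      = (fun t : Int × Int × Int => (t.2.1, t.2.2, t.1))
          (curs.foldl (fun best cur =>
            match pvCand workload ml sl nxts (PySem.List.pyGetD workload cur 0) with
            | none => best
            | some c => if c.1 < best.1 then (c.1, cur, c.2.2) else best) (m, a, b)) := by
  induction curs with
  | nil => intro a b m; rfl
  | cons cur rest ih =>
    intro a b m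
    rw [List.foldl_cons, List.foldl_cons]
    rw [pvInnerA_char (fun e => pvG ml sl (PySem.List.pyGetD workload cur 0) (PySem.List.pyGetD workload e 0)) cur nxts (a, b, m)]
    have hcc := pvCand_char workload ml sl nxts (PySem.List.pyGetD workload cur 0)
    cases hcand : pvCand workload ml sl nxts (PySem.List.pyGetD workload cur 0) with
    | none =>
      rw [hcand] at hcc
      simp only [Option.map_none] at hcc
      rw [← hcc]
      exact ih a b m
    | some c =>
      rw [hcand] at hcc
      simp only [Option.map_some] at hcc
      rw [← hcc]
      dsimp only
      by_cases hl : c.1 < m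
      · rw [if_pos (show c.1 < (a, b, m).2.2 from hl), if_pos hl]
        exact ih cur c.2.2 c.1
      · rw [if_neg (show ¬ c.1 < (a, b, m).2.2 from hl), if_neg hl]
        exact ih a b m

-- ===== VERDICT (by name: the statement is the Claim_ definition above) =====
theorem swap_experts_between_ranks_spec : Claim_equal_swap_experts_between_ranks := by
  unfold Claim_equal_swap_experts_between_ranks
  intro mds sds mre sre workload ml sl hdom hpre
  unfold Spec_swap_experts_between_ranks
  rw [pvA_eq, pvB_eq]
  by_cases hc : pvCurs mds sds mre = []
  · rw [if_pos hc, hc]; rfl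
  · rw [if_neg hc]
    simp only [pvWt]
    exact pvOuter workload ml sl (pvNxts mds sds sre) (pvCurs mds sds mre) (-1) (-1) ml
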